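/- CARRIED OVER by tools/port_base_units.py (renaming only) from proofs.vorbis/Vorbis/Spec/Units, GENERATED there by farm/mkstatement.py from design/units.tsv (unit `sincos_quadrant`) and the Specs of Vorbis/Spec/*.lean — do not edit.
   THE STATEMENT of the proof unit `sincos_quadrant`: the function `sincos_quadrant` (46 instructions) satisfies its contract,
   given the contracts of its callees. What the names mean: Vorbis/Spec/Basic.lean. The theorem to prove:
   `theorem sincos_quadrant_ok : ProgX.Base.Spec.sincos_quadrant.Statement`. -/
import ProgX.Base.Spec.Libm
namespace ProgX.Base.Spec.sincos_quadrant
open X86 X86.User Asan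

/-- The statement of unit `sincos_quadrant`. -/
def Statement : Prop :=
  ∀ (Lay : Layout) (_hLay : Lay.hi = 0x1000000) (μ : Microarch) (_hμ : UserX.MicroOK μ) (u₀ : State)
    (_hcode : HasCodeNat Lay u₀ ProgX.Base.L.sincos_quadrant.entry ProgX.Base.Code.code_sincos_quadrant.nat ProgX.Base.L.sincos_quadrant.size)
    (_h_floor : ∀ (others : List Obj) (frames : List (Nat × FrameLayout)), Calls Lay μ ProgX.Base.WayInv (ProgX.Base.conv u₀) ProgX.Base.L.floor.entry (ProgX.Base.Spec.floor.spec others frames))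
    (_h_cos_poly : ∀ (others : List Obj) (frames : List (Nat × FrameLayout)), Calls Lay μ ProgX.Base.WayInv (ProgX.Base.conv u₀) ProgX.Base.L.cos_poly.entry (ProgX.Base.Spec.cos_poly.spec others frames))
    (_h_sin_poly : ∀ (others : List Obj) (frames : List (Nat × FrameLayout)), Calls Lay μ ProgX.Base.WayInv (ProgX.Base.conv u₀) ProgX.Base.L.sin_poly.entry (ProgX.Base.Spec.sin_poly.spec others frames)),
    ∀ (others : List Obj) (frames : List (Nat × FrameLayout)), Calls Lay μ ProgX.Base.WayInv (ProgX.Base.conv u₀) ProgX.Base.L.sincos_quadrant.entry (ProgX.Base.Spec.sincos_quadrant.spec others frames)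

end ProgX.Base.Spec.sincos_quadrant
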